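-- pv_equiv track=rewrite | github.com/lotooo/adventofcode | 2024/19/test2.py | fget_arrangements
-- ===== SOURCE A (Python) =====
-- def fget_arrangements(pattern, towels):
--     """Test if a pattern is possible with the available towels"""
--     to_process = [""]
--     arrangements = []
--     while len(to_process) > 0:
--         p = to_process.pop()
--         if p == pattern:
--             arrangements.append(p)
--         for towel in towels:
--             if pattern.startswith(p + towel):
--                 to_process.append(p + towel)
--     return arrangements
-- ===== SOURCE B (Python) =====
-- def fget_arrangements(pattern, towels):
--     """Test if a pattern is possible with the available towels"""
--     n = len(pattern)
--     dp = [0] * (n + 1)   # dp[i] = number of towel sequences tiling pattern[i:]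
--     dp[n] = 1
--     for i in reversed(range(n)):
--         total = 0
--         for t in towels:
--             if pattern.startswith(t, i):
--                 total += dp[i + len(t)]
--         dp[i] = total
--     return [pattern] * dp[0]
-- ===== Notes on version B (the rewrite author's own statement) =====
-- stated objective: alternative
-- what changed: Replaces A's depth-first worklist enumeration of all prefix decompositions with a backward dynamic program that counts the tilings of each suffix and returns [pattern]*count; since the returned list has one entry per tiling, building the output still dominates when the count explodes.
import Mathlib
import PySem

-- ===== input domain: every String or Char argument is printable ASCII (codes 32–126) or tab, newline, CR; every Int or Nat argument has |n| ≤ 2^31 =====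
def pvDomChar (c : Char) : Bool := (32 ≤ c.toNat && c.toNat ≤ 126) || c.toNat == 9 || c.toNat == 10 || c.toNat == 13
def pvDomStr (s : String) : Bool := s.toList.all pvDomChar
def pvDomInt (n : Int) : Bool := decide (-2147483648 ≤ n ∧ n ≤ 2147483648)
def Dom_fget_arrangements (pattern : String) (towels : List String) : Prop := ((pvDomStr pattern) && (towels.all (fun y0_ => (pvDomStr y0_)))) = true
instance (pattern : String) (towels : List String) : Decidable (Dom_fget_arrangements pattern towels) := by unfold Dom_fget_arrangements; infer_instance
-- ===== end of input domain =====

-- B replaces A's depth-first worklist over prefix strings by a backward suffix DP that counts tilings and outputs [pattern]*count (the output list itself can be exponentially long, so no overall speed is claimed).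


-- ===== PORT A =====
-- `pattern.startswith(t, i)` on char lists (exact for 0 ≤ i): pattern[i:i+len(t)] == t
def fgaStarts (pat t : List Char) (i : Nat) : Bool := decide ((pat.drop i).take t.length = t)

-- fgaStarts with the extra requirement that t is nonempty (used only to size the fuel)
def fgaMatch (pat t : List Char) (i : Nat) : Bool := fgaStarts pat t i && decide (0 < t.length)

theorem fgaMatch_bounds {pat t : List Char} {i : Nat} (h : fgaMatch pat t i = true) :
    0 < t.length ∧ i + t.length ≤ pat.length := by
  simp [fgaMatch, fgaStarts] at h
  obtain ⟨h1, h2⟩ := h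
  refine ⟨h2, ?_⟩
  have := congrArg List.length h1
  simp [List.length_take, List.length_drop] at this
  omega

-- upper bound on the number of iterations A's while-loop spends on one stack entry of length i
def fgaSize (pat : List Char) (tws : List (List Char)) (i : Nat) : Nat :=
  1 + (((tws.filter (fun t => fgaMatch pat t i)).attach.map
        (fun x => fgaSize pat tws (i + x.1.length))).sum)
termination_by pat.length - i
decreasing_by
  have h := List.of_mem_filter x.2
  have := fgaMatch_bounds h
  omega

-- the while-loop: pop from the end of to_process (head = Python's last element), append matching extensions
def fgaPush (pat : List Char) (tws : List (List Char)) (p : List Char)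
    (st : List (List Char)) : List (List Char) :=
  tws.foldl (fun st t => if PySem.Chars.startswith pat (p ++ t) then (p ++ t) :: st else st) st

def fgaLoop (pat : List Char) (tws : List (List Char)) :
    Nat → List (List Char) → List (List Char) → List (List Char)
  | 0, _, arrangements => arrangements          -- fuel guard only; fgaSize pat tws 0 is always enough under Pre_
  | fuel + 1, to_process, arrangements =>
    match to_process with
    | [] => arrangements
    | p :: rest =>
      fgaLoop pat tws fuel (fgaPush pat tws p rest)
        (if p = pat then arrangements ++ [p] else arrangements)

def fget_arrangements (pattern : String) (towels : List String) : List String :=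
  (fgaLoop pattern.toList (towels.map (fun t => t.toList))
      (fgaSize pattern.toList (towels.map (fun t => t.toList)) 0) [[]] []).map
    (fun l => String.ofList l)

-- ===== PORT B =====
def fget_arrangements_alt (pattern : String) (towels : List String) : List String :=
  -- dp = [0]*(n+1); dp[n] = 1; for i in reversed(range(n)): dp[i] = Σ…; return [pattern]*dp[0]
  List.replicate
    (((List.range pattern.toList.length).reverse.foldl
        (fun dp i =>
          dp.set i ((towels.map (fun t => t.toList)).foldl (fun total t =>
            if fgaStarts pattern.toList t i then total + dp.getD (i + t.length) 0 else total) 0))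
        ((List.replicate (pattern.toList.length + 1) 0).set pattern.toList.length 1)).getD 0 0)
    pattern

-- ===== PRECONDITION & SPEC =====
-- Pre_ excludes towel lists containing the empty string: there A's while-loop re-pushes p forever and never returns.
def Pre_fget_arrangements (_pattern : String) (towels : List String) : Prop := "" ∉ towels
instance (pattern : String) (towels : List String) : Decidable (Pre_fget_arrangements pattern towels) := by unfold Pre_fget_arrangements; infer_instance

def pvWitness_fget_arrangements : String × List String := ("abab", ["a", "b", "ab"])

def Spec_fget_arrangements (pattern : String) (towels : List String) (out : List String) : Prop := out = fget_arrangements_alt pattern towels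
instance (pattern : String) (towels : List String) (out : List String) : Decidable (Spec_fget_arrangements pattern towels out) := by unfold Spec_fget_arrangements; infer_instance

-- ===== CLAIM (what is proved, stated in full; the proofs are below) =====
def Claim_equal_fget_arrangements : Prop := ∀ (pattern : String) (towels : List String), Dom_fget_arrangements pattern towels → Pre_fget_arrangements pattern towels → Spec_fget_arrangements pattern towels (fget_arrangements pattern towels)

-- ===== LEMMAS AND PROOFS =====

theorem attach_map_sum (l : List (List Char)) (f : List Char → Nat) :
    (l.attach.map (fun x => f x.1)).sum = (l.map f).sum := by
  simp only [List.attach, List.map_subtype, List.unattach_attachWith]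

theorem fgaSize_eq (pat : List Char) (tws : List (List Char)) (i : Nat) :
    fgaSize pat tws i =
      1 + (((tws.filter (fun t => fgaMatch pat t i)).map
            (fun t => fgaSize pat tws (i + t.length))).sum) := by
  rw [fgaSize]
  congr 1
  exact attach_map_sum (tws.filter (fun t => fgaMatch pat t i))
    (fun t => fgaSize pat tws (i + t.length))

-- number of towel sequences whose concatenation equals pattern[i:]
def fgaWays (pat : List Char) (tws : List (List Char)) (i : Nat) : Nat :=
  (if i = pat.length then 1 else 0) +
    (((tws.filter (fun t => fgaMatch pat t i)).attach.map
        (fun x => fgaWays pat tws (i + x.1.length))).sum)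
termination_by pat.length - i
decreasing_by
  have h := List.of_mem_filter x.2
  have := fgaMatch_bounds h
  omega

theorem fgaWays_eq (pat : List Char) (tws : List (List Char)) (i : Nat) :
    fgaWays pat tws i =
      (if i = pat.length then 1 else 0) +
      (((tws.filter (fun t => fgaMatch pat t i)).map
            (fun t => fgaWays pat tws (i + t.length))).sum) := by
  rw [fgaWays]
  congr 1
  exact attach_map_sum (tws.filter (fun t => fgaMatch pat t i))
    (fun t => fgaWays pat tws (i + t.length))

theorem fgaWays_top (pat : List Char) (tws : List (List Char)) :
    fgaWays pat tws pat.length = 1 := by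
  rw [fgaWays_eq]
  have hf : tws.filter (fun t => fgaMatch pat t pat.length) = [] := by
    rw [List.filter_eq_nil_iff]
    intro t _ h
    have := fgaMatch_bounds (by simpa using h)
    omega
  simp [hf]

-- Python's startswith(pattern, p + t) seen from the end of the prefix p
theorem starts_bridge {pat p : List Char} (t : List Char) (hp : p <+: pat) :
    PySem.Chars.startswith pat (p ++ t) = fgaStarts pat t p.length := by
  rcases hp with ⟨s, rfl⟩
  rw [Bool.eq_iff_iff]
  simp only [PySem.Chars.startswith_iff, fgaStarts, decide_eq_true_eq]
  rw [List.prefix_append_right_inj, List.drop_left, List.prefix_iff_eq_take]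
  exact eq_comm

theorem filter_bridge {pat p : List Char} {tws : List (List Char)}
    (hne : ∀ t ∈ tws, t ≠ []) (hp : p <+: pat) :
    tws.filter (fun t => PySem.Chars.startswith pat (p ++ t)) =
      tws.filter (fun t => fgaMatch pat t p.length) := by
  refine List.filter_congr (fun t ht => ?_)
  rw [starts_bridge t hp, fgaMatch]
  have h0 : 0 < t.length := List.length_pos_iff.mpr (hne t ht)
  simp [h0]

theorem fgaPush_eq (pat : List Char) (tws : List (List Char)) (p : List Char)
    (st : List (List Char)) :
    fgaPush pat tws p st =
      ((tws.filter (fun t => PySem.Chars.startswith pat (p ++ t))).map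
        (fun t => p ++ t)).reverse ++ st := by
  induction tws generalizing st with
  | nil => simp [fgaPush]
  | cons t ts ih =>
    have step : fgaPush pat (t :: ts) p st
        = fgaPush pat ts p (if PySem.Chars.startswith pat (p ++ t) then (p ++ t) :: st else st) := rfl
    rw [step, ih]
    by_cases h : PySem.Chars.startswith pat (p ++ t) <;> simp [h]

theorem fgaLoop_spec (pat : List Char) (tws : List (List Char))
    (hne : ∀ t ∈ tws, t ≠ []) :
    ∀ (fuel : Nat) (stack arr : List (List Char)),
    (∀ p ∈ stack, p <+: pat) →
    ((stack.map (fun p => fgaSize pat tws p.length)).sum) ≤ fuel →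
    fgaLoop pat tws fuel stack arr =
      arr ++ List.replicate ((stack.map (fun p => fgaWays pat tws p.length)).sum) pat := by
  intro fuel
  induction fuel with
  | zero =>
    intro stack arr hwf hfuel
    match stack with
    | [] => simp [fgaLoop]
    | p :: rest =>
      exfalso
      have h1 := fgaSize_eq pat tws p.length
      simp [List.map_cons, List.sum_cons] at hfuel
      omega
  | succ fuel ih =>
    intro stack arr hwf hfuel
    match stack with
    | [] => simp [fgaLoop]
    | p :: rest =>
      have hp : p <+: pat := hwf p List.mem_cons_self
      have hrest : ∀ q ∈ rest, q <+: pat := fun q hq => hwf q (List.mem_cons_of_mem _ hq)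
      show fgaLoop pat tws fuel (fgaPush pat tws p rest)
            (if p = pat then arr ++ [p] else arr) = _
      rw [fgaPush_eq, filter_bridge hne hp]
      set C := tws.filter (fun t => fgaMatch pat t p.length) with hC
      -- well-formedness of the pushed stack
      have hCpre : ∀ t ∈ C, (p ++ t) <+: pat := by
        intro t ht
        have hm : fgaMatch pat t p.length = true := by
          have := List.of_mem_filter ht
          simpa using this
        have hs : fgaStarts pat t p.length = true := by
          simp [fgaMatch] at hm; exact hm.1
        have hs' : PySem.Chars.startswith pat (p ++ t) = true := by
          rw [starts_bridge t hp]; exact hs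
        exact (PySem.Chars.startswith_iff _ _).mp hs'
      have hwf' : ∀ q ∈ (C.map (fun t => p ++ t)).reverse ++ rest, q <+: pat := by
        intro q hq
        rcases List.mem_append.mp hq with h | h
        · rcases List.mem_map.mp (List.mem_reverse.mp h) with ⟨t, ht, rfl⟩
          exact hCpre t ht
        · exact hrest q h
      -- sums over the pushed stack
      have hsum : ∀ (g : Nat → Nat),
          ((((C.map (fun t => p ++ t)).reverse ++ rest).map (fun q => g q.length)).sum)
            = ((C.map (fun t => g (p.length + t.length))).sum)
              + ((rest.map (fun q => g q.length)).sum) := by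
        intro g
        rw [List.map_append, List.sum_append, List.map_reverse, List.sum_reverse,
          List.map_map]
        congr 2
        exact List.map_congr_left (fun t _ => by simp [Function.comp, List.length_append])
      -- fuel bound
      have hfuel' : (((C.map (fun t => p ++ t)).reverse ++ rest).map
          (fun q => fgaSize pat tws q.length)).sum ≤ fuel := by
        rw [hsum]
        have h1 := fgaSize_eq pat tws p.length
        simp [List.map_cons, List.sum_cons] at hfuel
        rw [← hC] at h1
        omega
      rw [ih _ _ hwf' hfuel', hsum]
      -- combine the appended arrangement with the replicate count
      have hways := fgaWays_eq pat tws p.length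
      rw [← hC] at hways
      have hite : (if p.length = pat.length then (1:Nat) else 0) = (if p = pat then 1 else 0) := by
        by_cases hpp : p = pat
        · subst hpp; simp
        · rw [if_neg hpp, if_neg (fun h => hpp (List.IsPrefix.eq_of_length hp h))]
      have hcount : ((p :: rest).map (fun q => fgaWays pat tws q.length)).sum
          = (if p = pat then 1 else 0)
            + (((C.map (fun t => fgaWays pat tws (p.length + t.length))).sum)
                + ((rest.map (fun q => fgaWays pat tws q.length)).sum)) := by
        rw [List.map_cons, List.sum_cons, hways, hite]
        exact Nat.add_assoc _ _ _
      rw [hcount]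
      by_cases hpp : p = pat
      · subst hpp
        rw [if_pos rfl, if_pos rfl, Nat.add_comm 1, List.replicate_succ]
        simp
      · rw [if_neg hpp, if_neg hpp, Nat.zero_add]

-- the fold computing `total` in B is the filtered sum
theorem foldl_if_add (tws : List (List Char)) (c : List Char → Bool)
    (g : List Char → Nat) (a : Nat) :
    tws.foldl (fun tot t => if c t then tot + g t else tot) a
      = a + ((tws.filter c).map g).sum := by
  induction tws generalizing a with
  | nil => simp
  | cons t ts ih =>
    by_cases h : c t
    · simp [List.foldl_cons, h, ih]; omega
    · simp [List.foldl_cons, h, ih]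

-- invariant for B's backward DP loop
theorem dp_loop_spec (pat : List Char) (tws : List (List Char))
    (hne : ∀ t ∈ tws, t ≠ []) :
    ∀ (k : Nat), k ≤ pat.length → ∀ (dp : List Nat),
    dp.length = pat.length + 1 →
    (∀ j, k ≤ j → j ≤ pat.length → dp.getD j 0 = fgaWays pat tws j) →
    ∀ j, j ≤ pat.length →
      (((List.range k).reverse.foldl (fun dp i =>
        dp.set i (tws.foldl (fun total t =>
          if fgaStarts pat t i then total + dp.getD (i + t.length) 0 else total) 0)) dp).getD j 0)
        = fgaWays pat tws j := by
  intro k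
  induction k with
  | zero =>
    intro _ dp _ hinv j hj
    simpa using hinv j (Nat.zero_le j) hj
  | succ k ih =>
    intro hk dp hlen hinv j hj
    have hrange : (List.range (k + 1)).reverse = k :: (List.range k).reverse := by
      rw [List.range_succ, List.reverse_append]; simp
    rw [hrange, List.foldl_cons]
    set total := tws.foldl (fun total t =>
        if fgaStarts pat t k then total + dp.getD (k + t.length) 0 else total) 0 with htot
    have htotal : total = fgaWays pat tws k := by
      rw [htot, foldl_if_add]
      have hfeq : tws.filter (fun t => fgaStarts pat t k)
          = tws.filter (fun t => fgaMatch pat t k) := by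
        refine List.filter_congr (fun t ht => ?_)
        have h0 : 0 < t.length := List.length_pos_iff.mpr (hne t ht)
        simp [fgaMatch, h0]
      have hmeq : ∀ t ∈ tws.filter (fun t => fgaMatch pat t k),
          dp.getD (k + t.length) 0 = fgaWays pat tws (k + t.length) := by
        intro t ht
        have hm : fgaMatch pat t k = true := by simpa using List.of_mem_filter ht
        have hb := fgaMatch_bounds hm
        exact hinv (k + t.length) (by omega) (by omega)
      rw [fgaWays_eq]
      have hkne : k ≠ pat.length := by omega
      rw [if_neg hkne, hfeq, List.map_congr_left hmeq]
    refine ih (by omega) (dp.set k total) (by simpa using hlen) ?_ j hj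
    intro j hjk hjn
    by_cases hjeq : j = k
    · subst hjeq
      rw [← htotal]
      simp [List.getD, show j < dp.length by omega]
    · rw [show (dp.set k total).getD j 0 = dp.getD j 0 by
        simp [List.getD, List.getElem?_set_ne (Ne.symm hjeq)]]
      exact hinv j (by omega) hjn

-- ===== VERDICT (by name: the statement is the Claim_ definition above) =====
theorem fget_arrangements_spec : Claim_equal_fget_arrangements := by
  intro pattern towels _ hpre
  unfold Spec_fget_arrangements fget_arrangements fget_arrangements_alt
  set pat := pattern.toList with hpat
  set tws := towels.map (fun t => t.toList) with htws
  have hne : ∀ t ∈ tws, t ≠ [] := by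
    intro t ht
    rcases List.mem_map.mp ht with ⟨s, hs, rfl⟩
    intro h
    apply hpre
    have : s = "" := by
      simpa [String.length_eq_zero_iff] using congrArg List.length h
    rwa [← this]
  -- A's side
  have hA := fgaLoop_spec pat tws hne (fgaSize pat tws 0) [[]] []
    (by intro p hp; simp at hp; subst hp; exact List.nil_prefix)
    (by simp)
  simp only [List.map_cons, List.map_nil, List.sum_cons, List.sum_nil,
    List.length_nil, Nat.add_zero] at hA
  rw [hA]
  -- B's side
  have hB := dp_loop_spec pat tws hne pat.length (le_refl _)
    ((List.replicate (pat.length + 1) 0).set pat.length 1)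
    (by simp)
    (by
      intro j hj hjn
      have hjeq : j = pat.length := by omega
      rw [hjeq, fgaWays_top]
      simp [List.getD])
    0 (Nat.zero_le _)
  simp only [hB]
  simp
  exact Or.inr (by rw [hpat, String.ofList_toList])
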